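-- pv_equiv track=rewrite | github.com/walid404/InformationRetrievalSystem | IDF.py | counterVictorize
-- ===== SOURCE A (Python) =====
-- def counterVictorize(documentTermDict):
--     documentsnames = list(documentTermDict.keys())
--     termsNames = getTerms(documentTermDict)
--     termsFrequencyMatrix = [[0 for _ in documentsnames] for _ in termsNames]
--     for document in documentsnames:
--         for term in documentTermDict[document]:
--             termsFrequencyMatrix[termsNames.index(term)][documentsnames.index(document)] += 1
--
--     return termsFrequencyMatrix, documentsnames, termsNames
--
-- def getTerms(documentTermDict):
--     terms = []
--     for documentTerm in documentTermDict.values():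
--         for item in documentTerm:
--             if item not in terms:
--                 terms.append(item)
--
--     return terms
-- ===== SOURCE B (Python) =====
-- def getTerms(documentTermDict):
--     terms = []
--     for documentTerm in documentTermDict.values():
--         for item in documentTerm:
--             if item not in terms:
--                 terms.append(item)
--
--     return terms
--
-- def counterVictorize(documentTermDict):
--     documentsnames = list(documentTermDict.keys())
--     termsNames = getTerms(documentTermDict)
--     docCounts = []
--     for doc in documentsnames:
--         c = {}
--         for t in documentTermDict[doc]:
--             c[t] = c.get(t, 0) + 1
--         docCounts.append(c)
--     termsFrequencyMatrix = [[c.get(term, 0) for c in docCounts] for term in termsNames]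
--     return termsFrequencyMatrix, documentsnames, termsNames
-- ===== Notes on version B (the rewrite author's own statement) =====
-- stated objective: alternative
-- what changed: Instead of scattering += increments into a preallocated zero matrix via repeated list .index scans per occurrence, B builds one frequency dict per document in a single pass and then fills the matrix densely by direct dict lookups per (term, document) cell.
import Mathlib
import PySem

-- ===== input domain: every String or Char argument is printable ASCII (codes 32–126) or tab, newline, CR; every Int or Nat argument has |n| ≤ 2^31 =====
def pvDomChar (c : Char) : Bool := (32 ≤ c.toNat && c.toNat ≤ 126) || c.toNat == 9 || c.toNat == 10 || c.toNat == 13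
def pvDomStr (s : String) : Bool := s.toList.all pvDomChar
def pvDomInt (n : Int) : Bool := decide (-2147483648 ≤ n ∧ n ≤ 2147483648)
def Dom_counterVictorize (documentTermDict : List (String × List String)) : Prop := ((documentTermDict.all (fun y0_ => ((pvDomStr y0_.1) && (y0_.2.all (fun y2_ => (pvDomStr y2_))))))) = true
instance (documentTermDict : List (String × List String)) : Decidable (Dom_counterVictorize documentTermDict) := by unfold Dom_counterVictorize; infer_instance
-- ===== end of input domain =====

-- B replaces A's per-occurrence `+= 1` scatter (with a linear `.index` scan of the term and
-- document lists for every occurrence) by one counting dict per document followed by dense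
-- per-cell lookups; return value only, no argument is mutated.

-- ===== PORT A =====
-- shared helper: Python's getTerms is IDENTICAL in Source A and Source B, so both ports use this def
def getTerms (documentTermDict : List (String × List String)) : List String :=
  (PySem.Dict.mk documentTermDict).values.foldl
    (fun terms documentTerm =>
      documentTerm.foldl
        (fun terms item => if terms.contains item then terms else terms ++ [item]) terms)
    []

def counterVictorize (documentTermDict : List (String × List String)) :
    List (List Int) × List String × List String :=
  let d := PySem.Dict.mk documentTermDict
  let documentsnames := PySem.Dict.keys d
  let termsNames := getTerms documentTermDict
  let m0 := termsNames.map (fun _ => documentsnames.map (fun _ => (0 : Int)))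
  let m := documentsnames.foldl
    (fun m document =>
      (PySem.Dict.getD d document []).foldl
        (fun m term =>
          m.modify ((PySem.List.index? termsNames term).getD 0)
            (fun row => row.modify ((PySem.List.index? documentsnames document).getD 0) (· + 1)))
        m)
    m0
  (m, documentsnames, termsNames)

-- ===== PORT B =====
def counterVictorize_alt (documentTermDict : List (String × List String)) :
    List (List Int) × List String × List String :=
  let d := PySem.Dict.mk documentTermDict
  let documentsnames := PySem.Dict.keys d
  let termsNames := getTerms documentTermDict
  let docCounts := documentsnames.map
    (fun doc =>
      (PySem.Dict.getD d doc []).foldl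
        (fun c t => PySem.Dict.insert c t (PySem.Dict.getD c t 0 + 1))
        (PySem.Dict.empty : PySem.Dict String Int))
  let m := termsNames.map (fun term => docCounts.map (fun c => PySem.Dict.getD c term 0))
  (m, documentsnames, termsNames)

-- ===== PRECONDITION & SPEC =====
-- Pre_ excludes association lists with duplicate keys: the Python argument is a dict, whose
-- item list can never carry two equal keys, so such lists represent no actual input of A.
def Pre_counterVictorize (documentTermDict : List (String × List String)) : Prop :=
  (documentTermDict.map Prod.fst).Nodup

instance (documentTermDict : List (String × List String)) : Decidable (Pre_counterVictorize documentTermDict) := by unfold Pre_counterVictorize; infer_instance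

def pvWitness_counterVictorize : (List (String × List String)) :=
  [("d1", ["a", "b", "a"]), ("d2", ["b"]), ("d3", [])]

def Spec_counterVictorize (documentTermDict : List (String × List String)) (out : List (List Int) × List String × List String) : Prop := out = counterVictorize_alt documentTermDict
instance (documentTermDict : List (String × List String)) (out : List (List Int) × List String × List String) : Decidable (Spec_counterVictorize documentTermDict out) := by unfold Spec_counterVictorize; infer_instance

-- ===== CLAIM (what is proved, stated in full; the proofs are below) =====
def Claim_equal_counterVictorize : Prop := ∀ (documentTermDict : List (String × List String)), Dom_counterVictorize documentTermDict → Pre_counterVictorize documentTermDict → Spec_counterVictorize documentTermDict (counterVictorize documentTermDict)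


-- ===== LEMMAS AND PROOFS =====

-- A's term and document axes and its initial zero matrix, named for the proofs
def cvT (L : List (String × List String)) : List String :=
  PySem.Set.ofList ((L.map Prod.snd).flatten)
def cvD (L : List (String × List String)) : List String := L.map Prod.fst
def cvM0 (L : List (String × List String)) : List (List Int) :=
  (cvT L).map (fun _ => (cvD L).map (fun _ => (0 : Int)))

-- the value of matrix cell (i, j), with defaults so it is total
def cvCell (M : List (List Int)) (i j : Nat) : Int := ((M[i]?.getD [])[j]?.getD 0)

-- one `+= 1` update of A's matrix at the (row, column) pair p
def cvStep (M : List (List Int)) (p : Nat × Nat) : List (List Int) :=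
  M.modify p.1 (fun r => r.modify p.2 (· + 1))

-- Python's list.index as the Nat A uses (the default is never taken: the element is present)
def cvIdx (xs : List String) (x : String) : Nat := (PySem.List.index? xs x).getD 0

-- processing one document of A's outer loop, occurrence pairs made explicit
def cvDocStep (gT gD : List String) (m : List (List Int)) (p : String × List String) :
    List (List Int) :=
  (p.2.map (fun t => (cvIdx gT t, cvIdx gD p.1))).foldl cvStep m

lemma idxOf?_mem (l : List String) (x : String) (h : x ∈ l) :
    List.idxOf? x l = some (l.idxOf x) := by
  induction l with
  | nil => cases h
  | cons a l ih =>
    by_cases hx : a = x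
    · simp [List.idxOf?, List.idxOf, List.findIdx?_cons, List.findIdx_cons, hx]
    · have hm : x ∈ l := by cases h with | head => exact absurd rfl hx | tail _ h => exact h
      simp only [List.idxOf?, List.idxOf, List.findIdx?_cons, List.findIdx_cons, beq_iff_eq, hx,
        if_false, cond_false] at ih ⊢
      rw [ih hm]
      simp [Bool.cond_eq_ite, beq_iff_eq, hx]

lemma cvIdx_eq_idxOf (xs : List String) (x : String) (h : x ∈ xs) : cvIdx xs x = xs.idxOf x := by
  rw [cvIdx, PySem.List.index?_eq_idxOf?, idxOf?_mem xs x h, Option.getD_some]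

lemma cvIdx_lt (xs : List String) (x : String) (h : x ∈ xs) : cvIdx xs x < xs.length := by
  rw [cvIdx_eq_idxOf xs x h]; exact List.idxOf_lt_length_of_mem h

lemma cvIdx_getElem (xs : List String) (hnd : xs.Nodup) (k : Nat) (hk : k < xs.length) :
    cvIdx xs xs[k] = k := by
  rw [cvIdx_eq_idxOf xs xs[k] (xs.getElem_mem hk)]
  exact List.Nodup.idxOf_getElem hnd ..

lemma cvIdx_eq_iff (xs : List String) (x : String) (i : Nat) (hnd : xs.Nodup)
    (hx : x ∈ xs) (hi : i < xs.length) : cvIdx xs x = i ↔ x = xs[i] := by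
  constructor
  · intro h
    have hidx : xs.idxOf x = i := by rw [← cvIdx_eq_idxOf xs x hx]; exact h
    subst hidx
    exact (List.getElem_idxOf _).symm
  · intro h; subst h; exact cvIdx_getElem xs hnd i hi

lemma cvStep_map_length (M : List (List Int)) (p : Nat × Nat) :
    (cvStep M p).map List.length = M.map List.length := by
  apply List.ext_getElem?
  intro k
  simp only [cvStep, List.getElem?_map, List.getElem?_modify]
  cases M[k]? with
  | none => rfl
  | some r => simp only [Option.map_some]; split <;> simp

lemma foldl_cvStep_map_length (ps : List (Nat × Nat)) : ∀ (M : List (List Int)),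
    (ps.foldl cvStep M).map List.length = M.map List.length := by
  induction ps with
  | nil => intro M; rfl
  | cons p ps ih => intro M; rw [List.foldl_cons, ih, cvStep_map_length]

lemma foldl_cvDocStep_map_length (gT gD : List String) (ls : List (String × List String)) :
    ∀ (M : List (List Int)), (ls.foldl (cvDocStep gT gD) M).map List.length = M.map List.length := by
  induction ls with
  | nil => intro M; rfl
  | cons p ls ih =>
    intro M
    rw [List.foldl_cons, ih, cvDocStep, foldl_cvStep_map_length]

lemma rowlen_eq (M N : List (List Int)) (h : M.map List.length = N.map List.length) (k : Nat) :
    (M[k]?.getD []).length = (N[k]?.getD []).length := by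
  have hk : ((M.map List.length))[k]? = ((N.map List.length))[k]? := by rw [h]
  simp only [List.getElem?_map] at hk
  cases h1 : M[k]? <;> cases h2 : N[k]? <;> simp [h1, h2] at hk ⊢ <;> simp [hk]

lemma cvCell_cvStep (M : List (List Int)) (p : Nat × Nat) (i j : Nat)
    (h1 : p.1 < M.length) (h2 : p.2 < (M[p.1]?.getD []).length) :
    cvCell (cvStep M p) i j = cvCell M i j + if (i, j) = p then 1 else 0 := by
  obtain ⟨a, b⟩ := p
  simp only [cvCell, cvStep, List.getElem?_modify]
  by_cases hia : a = i
  · subst hia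
    rw [List.getElem?_eq_getElem h1]
    simp only [Option.getD_some, List.getElem?_modify, if_pos rfl, Option.map_some]
    by_cases hjb : b = j
    · subst hjb
      simp only [List.getElem?_eq_getElem h1, Option.getD_some] at h2
      simp [List.getElem?_eq_getElem h2]
    · simp only [Prod.mk.injEq, true_and]
      rw [if_neg (Ne.symm hjb)]
      simp [List.getElem?_modify, hjb]
      try omega
  · have hne : ((i, j) = (a, b)) = False := by
      simp only [Prod.mk.injEq, eq_iff_iff, iff_false, not_and]
      intro h; exact absurd h.symm hia
    simp only [if_neg hia, hne, if_false, add_zero]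
    cases hmk : M[i]? <;> simp

lemma cvCell_foldl_count (ps : List (Nat × Nat)) : ∀ (M : List (List Int)),
    (∀ p ∈ ps, p.1 < M.length ∧ p.2 < (M[p.1]?.getD []).length) →
    ∀ i j, cvCell (ps.foldl cvStep M) i j = cvCell M i j + (ps.count (i, j) : Int) := by
  induction ps with
  | nil => intro M _ i j; simp
  | cons p ps ih =>
    intro M hM i j
    rw [List.foldl_cons]
    have hrows : ∀ (k : Nat), ((cvStep M p)[k]?.getD []).length = (M[k]?.getD []).length :=
      rowlen_eq _ _ (cvStep_map_length M p)
    have hlen : (cvStep M p).length = M.length := by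
      have := congrArg List.length (cvStep_map_length M p)
      simpa using this
    rw [ih (cvStep M p) (fun q hq => ⟨hlen ▸ (hM q (List.mem_cons_of_mem _ hq)).1,
          (hrows q.1) ▸ (hM q (List.mem_cons_of_mem _ hq)).2⟩)]
    have hp := hM p List.mem_cons_self
    rw [cvCell_cvStep M p i j hp.1 hp.2]
    rw [List.count_cons]
    push_cast
    have hbe : (p == (i, j)) = ((i, j) = p) := by
      by_cases h : p = (i, j)
      · simp [h]
      · simp [h]; intro hh; exact h hh.symm
    simp only [hbe]
    split <;> ring

lemma inner_eq_update (dt : List String) (s : List String) :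
    dt.foldl (fun terms item => if terms.contains item then terms else terms ++ [item]) s
      = PySem.Set.update s dt := by
  rw [PySem.Set.update]
  rfl

lemma foldl_update_eq (vs : List (List String)) : ∀ (s : List String),
    vs.foldl PySem.Set.update s = PySem.Set.update s vs.flatten := by
  induction vs with
  | nil => intro s; simp [PySem.Set.update]
  | cons v vs ih =>
    intro s
    rw [List.foldl_cons, ih, List.flatten_cons, PySem.Set.update_append]

lemma getTerms_eq (L : List (String × List String)) : getTerms L = cvT L := by
  have hv : (PySem.Dict.mk L).values = L.map Prod.snd := by
    simp [PySem.Dict.values, PySem.Dict.items]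
  rw [getTerms, hv]
  calc (L.map Prod.snd).foldl
        (fun terms documentTerm => documentTerm.foldl
          (fun terms item => if terms.contains item then terms else terms ++ [item]) terms) []
      = (L.map Prod.snd).foldl PySem.Set.update [] := by
        apply PySem.List.foldl_congr_mem
        intro s x _
        exact inner_eq_update x s
    _ = PySem.Set.update [] ((L.map Prod.snd).flatten) := foldl_update_eq _ []
    _ = cvT L := PySem.Set.update_nil_left _

lemma keys_mk_eq (L : List (String × List String)) :
    PySem.Dict.keys (PySem.Dict.mk L) = cvD L := by
  simp [PySem.Dict.keys, PySem.Dict.items, cvD]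

lemma getD_mk_mem (L : List (String × List String)) (p : String × List String)
    (hp : p ∈ L) (hnd : (cvD L).Nodup) :
    PySem.Dict.getD (PySem.Dict.mk L) p.1 [] = p.2 :=
  PySem.Dict.getD_of_mem_items (PySem.Dict.mk L) (k := p.1) (v := p.2)
    (by simpa [PySem.Dict.items] using hp) (by rw [keys_mk_eq]; exact hnd) []

lemma mem_cvT (L : List (String × List String)) (p : String × List String) (hp : p ∈ L)
    (t : String) (ht : t ∈ p.2) : t ∈ cvT L := by
  rw [cvT, PySem.Set.mem_ofList]
  exact List.mem_flatten.2 ⟨p.2, List.mem_map.2 ⟨p, hp, rfl⟩, ht⟩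

lemma nodup_cvT (L : List (String × List String)) : (cvT L).Nodup := PySem.Set.nodup_ofList _

lemma cvCell_cvM0 (L : List (String × List String)) (i j : Nat) : cvCell (cvM0 L) i j = 0 := by
  simp only [cvCell, cvM0, List.getElem?_map]
  cases h1 : (cvT L)[i]? <;> cases h2 : (cvD L)[j]? <;> simp

-- the invariant of A's outer loop: after the first n documents, cell (i, j) holds the count of
-- term i in document j when j < n, and is still 0 otherwise
lemma cvMain (L : List (String × List String)) (hnd : (cvD L).Nodup) :
    ∀ (n : Nat), n ≤ L.length → ∀ (i j : Nat), i < (cvT L).length → j < L.length →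
    cvCell ((L.take n).foldl (cvDocStep (cvT L) (cvD L)) (cvM0 L)) i j
      = if j < n then (((L[j]?.getD ("", [])).2).count ((cvT L)[i]?.getD "") : Int) else 0 := by
  intro n
  induction n with
  | zero => intro _ i j _ _; simp [cvCell_cvM0]
  | succ n ih =>
    intro hn i j hi hj
    have hn' : n < L.length := by omega
    have htake : L.take (n + 1) = L.take n ++ [L[n]] := by
      rw [List.take_succ, List.getElem?_eq_getElem hn']
      rfl
    rw [htake, List.foldl_append, List.foldl_cons, List.foldl_nil]
    set prevM := (L.take n).foldl (cvDocStep (cvT L) (cvD L)) (cvM0 L) with hprev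
    have hmaplen : prevM.map List.length = (cvM0 L).map List.length :=
      foldl_cvDocStep_map_length _ _ _ _
    have hlen : prevM.length = (cvM0 L).length := by
      have := congrArg List.length hmaplen; simpa using this
    have hM0len : (cvM0 L).length = (cvT L).length := by simp [cvM0]
    have hrowlen : ∀ (k : Nat), k < (cvT L).length → (prevM[k]?.getD []).length = L.length := by
      intro k hk
      rw [rowlen_eq _ _ hmaplen k]
      have : (cvM0 L)[k]? = some ((cvD L).map (fun _ => (0 : Int))) := by
        rw [cvM0, List.getElem?_map, List.getElem?_eq_getElem hk]
        rfl
      simp [this, cvD]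
    have hidxD : cvIdx (cvD L) (L[n].1) = n := by
      have : (cvD L)[n]'(by simpa [cvD] using hn') = L[n].1 := by
        simp [cvD]
      rw [← this]
      exact cvIdx_getElem _ hnd n (by simpa [cvD] using hn')
    rw [cvDocStep, cvCell_foldl_count _ prevM ?hrange i j]
    case hrange =>
      intro q hq
      obtain ⟨t, ht, rfl⟩ := List.mem_map.1 hq
      have htT : t ∈ cvT L := mem_cvT L L[n] (L.getElem_mem hn') t ht
      constructor
      · rw [hlen, hM0len]
        exact cvIdx_lt _ _ htT
      · rw [hrowlen _ (cvIdx_lt _ _ htT), hidxD]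
        exact hn'
    rw [ih (by omega) i j hi hj]
    have hcount : ((L[n].2.map (fun t => (cvIdx (cvT L) t, cvIdx (cvD L) (L[n].1)))).count (i, j) : Int)
        = if j = n then ((L[n].2).count ((cvT L)[i]?.getD "") : Int) else 0 := by
      rw [List.count, List.countP_map]
      by_cases hjn : j = n
      · rw [if_pos hjn]
        have key : ∀ t ∈ L[n].2,
            ((fun q => q == (i, j)) ∘ (fun t => (cvIdx (cvT L) t, cvIdx (cvD L) (L[n].1)))) t
              = (t == (cvT L)[i]?.getD "") := by
          intro t ht
          have htT : t ∈ cvT L := mem_cvT L L[n] (L.getElem_mem hn') t ht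
          simp only [Function.comp_apply, hidxD]
          rw [List.getElem?_eq_getElem hi, Option.getD_some]
          have hiff := cvIdx_eq_iff (cvT L) t i (nodup_cvT L) htT hi
          by_cases hti : cvIdx (cvT L) t = i
          · rw [hti, hiff.1 hti, hjn]
            simp
          · have hne : ¬ t = (cvT L)[i] := fun h => hti (hiff.2 h)
            simp [beq_iff_eq, Prod.ext_iff, hti, hne]
        rw [List.countP_congr (fun x hx => by rw [key x hx])]
        rfl
      · rw [if_neg hjn]
        have hz : (L[n].2).countP
            ((fun q => q == (i, j)) ∘ (fun t => (cvIdx (cvT L) t, cvIdx (cvD L) (L[n].1)))) = 0 := by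
          rw [List.countP_eq_zero]
          intro t _
          simp only [Function.comp_apply, hidxD]
          simp [beq_iff_eq, Prod.ext_iff, Ne.symm hjn]
        rw [hz]
        rfl
    rw [hcount]
    by_cases hjn : j = n
    · rw [if_neg (by omega), if_pos hjn, if_pos (by omega), zero_add, hjn,
        List.getElem?_eq_getElem hn', Option.getD_some]
    · rw [if_neg hjn, add_zero]
      by_cases hjlt : j < n
      · rw [if_pos hjlt, if_pos (by omega)]
      · rw [if_neg hjlt, if_neg (by omega)]

-- ===== VERDICT (by name: the statement is the Claim_ definition above) =====
theorem counterVictorize_spec : Claim_equal_counterVictorize := by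
  intro L _ hnd
  rw [Spec_counterVictorize]
  have hnd' : (cvD L).Nodup := hnd
  simp only [counterVictorize, counterVictorize_alt, keys_mk_eq, getTerms_eq]
  refine Prod.ext ?_ rfl
  -- rewrite A's outer loop into cvDocStep form over L itself
  have hA : (cvD L).foldl
      (fun m document =>
        (PySem.Dict.getD (PySem.Dict.mk L) document []).foldl
          (fun m term =>
            m.modify ((PySem.List.index? (cvT L) term).getD 0)
              (fun row => row.modify ((PySem.List.index? (cvD L) document).getD 0) (· + 1)))
          m)
      (cvM0 L)
      = L.foldl (cvDocStep (cvT L) (cvD L)) (cvM0 L) := by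
    rw [cvD, List.foldl_map]
    apply PySem.List.foldl_congr_mem
    intro m p hp
    rw [getD_mk_mem L p hp hnd']
    rw [cvDocStep, List.foldl_map]
    rfl
  show (cvD L).foldl _ ((cvT L).map fun _ => (cvD L).map fun _ => (0 : Int)) = (cvT L).map _
  rw [show ((cvT L).map (fun _ => (cvD L).map (fun _ => (0:Int)))) = cvM0 L from rfl, hA]
  have hcell : ∀ (i j : Nat), i < (cvT L).length → j < L.length →
      cvCell (L.foldl (cvDocStep (cvT L) (cvD L)) (cvM0 L)) i j
        = (((L[j]?.getD ("", [])).2).count ((cvT L)[i]?.getD "") : Int) := by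
    intro i j hi hj
    have := cvMain L hnd' L.length le_rfl i j hi hj
    rw [List.take_length] at this
    rw [this, if_pos hj]
  have hmaplen : (L.foldl (cvDocStep (cvT L) (cvD L)) (cvM0 L)).map List.length
      = (cvM0 L).map List.length := foldl_cvDocStep_map_length _ _ _ _
  have hlenA : (L.foldl (cvDocStep (cvT L) (cvD L)) (cvM0 L)).length = (cvT L).length := by
    have := congrArg List.length hmaplen
    simpa [cvM0] using this
  apply List.ext_getElem (by simpa using hlenA)
  intro i hiA hiB
  have hi : i < (cvT L).length := by rw [← hlenA]; exact hiA
  have hrowA : ((L.foldl (cvDocStep (cvT L) (cvD L)) (cvM0 L))[i]?.getD []).length = L.length := by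
    rw [rowlen_eq _ _ hmaplen i]
    have hM0i : (cvM0 L)[i]? = some ((cvD L).map (fun _ => (0 : Int))) := by
      rw [cvM0, List.getElem?_map, List.getElem?_eq_getElem hi]
      rfl
    simp [hM0i, cvD]
  have hgetA : (L.foldl (cvDocStep (cvT L) (cvD L)) (cvM0 L))[i]?.getD []
      = (L.foldl (cvDocStep (cvT L) (cvD L)) (cvM0 L))[i] := by
    rw [List.getElem?_eq_getElem hiA, Option.getD_some]
  apply List.ext_getElem (by rw [← hgetA, hrowA]; simp [cvD])
  intro j hjA hjB
  have hj : j < L.length := by rw [← hgetA, hrowA] at hjA; exact hjA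
  have hcellA : (L.foldl (cvDocStep (cvT L) (cvD L)) (cvM0 L))[i][j]
      = cvCell (L.foldl (cvDocStep (cvT L) (cvD L)) (cvM0 L)) i j := by
    rw [cvCell, hgetA, List.getElem?_eq_getElem hjA, Option.getD_some]
  rw [hcellA, hcell i j hi hj]
  -- B side cell
  simp only [List.getElem_map]
  have hDj : (cvD L)[j]'(by simpa [cvD] using hj) = L[j].1 := by simp [cvD]
  rw [hDj, getD_mk_mem L L[j] (L.getElem_mem hj) hnd',
    PySem.Dict.getD_foldl_insert_add_one, PySem.Dict.getD_empty]
  rw [List.getElem?_eq_getElem hj, List.getElem?_eq_getElem hi]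
  simp
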